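-- pv_equiv track=rewrite | github.com/NicoledyChen/playground4td | scripts/wandb_live_dashboard.py | _mode_key
-- ===== SOURCE A (Python) =====
-- from collections import Counter
-- from typing import Any, Optional
--
-- def _mode_key(keys: list[str]) -> Optional[str]:
--     """Mode with tie-break by first appearance."""
--     if not keys:
--         return None
--     counts: Counter[str] = Counter()
--     first_idx: dict[str, int] = {}
--     best_key: Optional[str] = None
--     best = (0, 10**18)  # (count, first)
--     for i, k in enumerate(keys):
--         counts[k] += 1
--         if k not in first_idx:
--             first_idx[k] = i
--         cur = (counts[k], first_idx[k])
--         if cur[0] > best[0] or (cur[0] == best[0] and cur[1] < best[1]):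
--             best = cur
--             best_key = k
--     return best_key
-- ===== SOURCE B (Python) =====
-- from collections import Counter
-- from typing import Optional
--
--
-- def _mode_key(keys: list[str]) -> Optional[str]:
--     """Mode with tie-break by first appearance: count everything first, then
--     return the first key in the original order whose count is maximal."""
--     if not keys:
--         return None
--     counts = Counter(keys)
--     best = max(counts.values())
--     for k in keys:
--         if counts[k] == best:
--             return k
-- ===== Notes on version B (the rewrite author's own statement) =====
-- stated objective: faster
-- what changed: Replaces A's single incremental pass that threads a (count, first-index) best-tracking state and a first_idx dict through every element with a two-phase decomposition: build the full Counter at once, take max of its values, then rescan the original list and return the first key attaining that max (which preserves the first-appearance tie-break).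
import Mathlib
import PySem

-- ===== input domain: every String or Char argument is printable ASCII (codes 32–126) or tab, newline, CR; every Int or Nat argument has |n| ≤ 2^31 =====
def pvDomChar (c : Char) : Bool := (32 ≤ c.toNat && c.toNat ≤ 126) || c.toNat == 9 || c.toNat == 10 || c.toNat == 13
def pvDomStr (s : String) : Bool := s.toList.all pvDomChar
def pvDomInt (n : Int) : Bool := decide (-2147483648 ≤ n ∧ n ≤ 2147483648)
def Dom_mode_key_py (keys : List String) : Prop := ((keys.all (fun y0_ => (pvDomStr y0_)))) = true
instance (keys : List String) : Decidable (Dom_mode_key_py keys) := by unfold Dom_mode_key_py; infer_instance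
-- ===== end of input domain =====

-- B replaces A's incremental best-tracking pass by: count all, take the max count, rescan for the
-- first key attaining it (simpler decomposition; same first-appearance tie-break).

-- ===== PORT A =====
-- loop state: (counts, first_idx, best_key, best)
-- Python's `first_idx[k]` is ported as `getD k 0`: the key is always present there (inserted just above).
def pvStepA (s : PySem.Dict String Int × PySem.Dict String Int × Option String × Int × Int)
    (p : Int × String) :
    PySem.Dict String Int × PySem.Dict String Int × Option String × Int × Int :=
  let counts := s.1
  let firstIdx := s.2.1
  let bestKey := s.2.2.1
  let best := s.2.2.2
  let i := p.1
  let k := p.2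
  let counts := counts.modify k 0 (· + 1)              -- counts[k] += 1 (Counter)
  let firstIdx := if firstIdx.contains k then firstIdx else firstIdx.insert k i
  let cur : Int × Int := (counts.getD k 0, firstIdx.getD k 0)
  if cur.1 > best.1 ∨ (cur.1 = best.1 ∧ cur.2 < best.2) then
    (counts, firstIdx, some k, cur)
  else
    (counts, firstIdx, bestKey, best)

def mode_key_py (keys : List String) : Option String :=
  if keys = [] then none
  else
    let st := (PySem.List.enumerate keys).foldl pvStepA
      (PySem.Dict.empty, PySem.Dict.empty, none, 0, 10 ^ 18)
    st.2.2.1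

-- ===== PORT B =====
def mode_key_py_alt (keys : List String) : Option String :=
  if keys = [] then none
  else
    let counts := PySem.Dict.counter keys
    -- max(counts.values()): counts is nonempty here, so Python's max returns; the none arm is unreachable
    match PySem.List.max? counts.values (fun v => v) with
    | none => none
    | some best => keys.find? (fun k => counts.getD k 0 == best)

-- ===== PRECONDITION & SPEC =====
def Spec_mode_key_py (keys : List String) (out : Option String) : Prop := out = mode_key_py_alt keys
instance (keys : List String) (out : Option String) : Decidable (Spec_mode_key_py keys out) := by unfold Spec_mode_key_py; infer_instance

-- ===== CLAIM (what is proved, stated in full; the proofs are below) =====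
def Claim_equal_mode_key_py : Prop := ∀ (keys : List String), Dom_mode_key_py keys → Spec_mode_key_py keys (mode_key_py keys)

-- ===== LEMMAS AND PROOFS =====

-- the common characterisation: w is the mode of l with first-appearance tie-break
def pvIsMode (l : List String) (w : String) : Prop :=
  w ∈ l ∧ (∀ x ∈ l, l.count x ≤ l.count w) ∧
    (∀ x ∈ l, l.count x = l.count w → l.idxOf w ≤ l.idxOf x)

theorem pvIsMode_unique {l : List String} {w w' : String}
    (h : pvIsMode l w) (h' : pvIsMode l w') : w = w' := by
  obtain ⟨hm, hc, hi⟩ := h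
  obtain ⟨hm', hc', hi'⟩ := h'
  have hcc : l.count w' = l.count w := le_antisymm (hc _ hm') (hc' _ hm)
  have h1 : l.idxOf w ≤ l.idxOf w' := hi _ hm' hcc
  have h2 : l.idxOf w' ≤ l.idxOf w := hi' _ hm hcc.symm
  have hidx : l.idxOf w = l.idxOf w' := le_antisymm h1 h2
  have hw : l[l.idxOf w]'(List.idxOf_lt_length_of_mem hm) = w := List.getElem_idxOf _
  have hw' : l[l.idxOf w']'(List.idxOf_lt_length_of_mem hm') = w' := List.getElem_idxOf _
  rw [← hw, ← hw']
  simp [hidx]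

theorem pvFind?_idxOf_le {p : String → Bool} {l : List String} {w : String}
    (h : l.find? p = some w) : ∀ x ∈ l, p x = true → l.idxOf w ≤ l.idxOf x := by
  induction l with
  | nil => simp at h
  | cons a t ih =>
    intro x hx hpx
    by_cases hpa : p a = true
    · have hw : w = a := by simp [hpa] at h; exact h.symm
      subst hw
      simp [List.idxOf_cons_self]
    · have hpa' : p a = false := by
        cases hq : p a
        · rfl
        · exact absurd hq hpa
      have ht : t.find? p = some w := by
        simpa [List.find?_cons, hpa'] using h
      have hpw : p w = true := List.find?_some ht
      have haw : a ≠ w := fun e => hpa (e ▸ hpw)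
      have hax : a ≠ x := fun e => hpa (e ▸ hpx)
      have hxt : x ∈ t := by
        rcases List.mem_cons.mp hx with rfl | h2
        · exact absurd rfl hax
        · exact h2
      have := ih ht x hxt hpx
      simp [haw, hax]
      omega

theorem pvB_char {keys : List String} (hne : keys ≠ []) :
    ∃ w, mode_key_py_alt keys = some w ∧ pvIsMode keys w := by
  have hvals : (PySem.Dict.counter keys).values
      = (PySem.Set.ofList keys).map (fun k => ((keys.count k : Int))) := by
    show ((PySem.Dict.counter keys).items).map (·.2) = _
    rw [PySem.Dict.items_counter]
    simp [List.map_map, Function.comp]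
  obtain ⟨M, hM⟩ : ∃ M, PySem.List.max? (PySem.Dict.counter keys).values (fun v => v) = some M := by
    cases h : PySem.List.max? (PySem.Dict.counter keys).values (fun v => v) with
    | none =>
      rw [PySem.List.max?_eq_none_iff, hvals, List.map_eq_nil_iff] at h
      have : keys = [] := by
        cases hk : keys with
        | nil => rfl
        | cons a t =>
          exfalso
          have : a ∈ PySem.Set.ofList keys := (PySem.Set.mem_ofList _ _).mpr (by simp [hk])
          simp [h] at this
      exact absurd this hne
    | some M => exact ⟨M, rfl⟩
  have hmemM : ∃ k0, k0 ∈ keys ∧ ((keys.count k0 : Int)) = M := by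
    have := PySem.List.max?_mem hM
    rw [hvals] at this
    obtain ⟨k0, hk0, hv⟩ := List.mem_map.mp this
    exact ⟨k0, (PySem.Set.mem_ofList _ _).mp hk0, hv⟩
  have hmaxM : ∀ x ∈ keys, ((keys.count x : Int)) ≤ M := by
    intro x hx
    have hxv : ((keys.count x : Int)) ∈ (PySem.Dict.counter keys).values := by
      rw [hvals]
      exact List.mem_map.mpr ⟨x, (PySem.Set.mem_ofList _ _).mpr hx, rfl⟩
    exact PySem.List.max?_isMax hM _ hxv
  have hp : ∀ x, ((PySem.Dict.counter keys).getD x 0 == M) = ((keys.count x : Int) == M) := by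
    intro x; rw [PySem.Dict.getD_counter]
  obtain ⟨k0, hk0m, hk0⟩ := hmemM
  obtain ⟨w, hw⟩ : ∃ w, keys.find? (fun k => (PySem.Dict.counter keys).getD k 0 == M) = some w := by
    have : (keys.find? (fun k => (PySem.Dict.counter keys).getD k 0 == M)).isSome := by
      rw [List.find?_isSome]
      exact ⟨k0, hk0m, by rw [hp]; exact beq_iff_eq.mpr hk0⟩
    exact Option.isSome_iff_exists.mp this
  have hwm : w ∈ keys := List.mem_of_find?_eq_some hw
  have hwM : ((keys.count w : Int)) = M := by
    have := List.find?_some hw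
    rw [hp] at this
    exact beq_iff_eq.mp this
  refine ⟨w, ?_, ?_, ?_, ?_⟩
  · unfold mode_key_py_alt
    rw [if_neg hne]
    simp only [hM]
    exact hw
  · exact hwm
  · intro x hx
    have := hmaxM x hx
    rw [← hwM] at this
    exact_mod_cast this
  · intro x hx hcx
    refine pvFind?_idxOf_le hw x hx ?_
    rw [hp, hcx, hwM]
    exact beq_iff_eq.mpr rfl

-- ===== A-side loop invariant =====
def pvInv (pre : List String)
    (s : PySem.Dict String Int × PySem.Dict String Int × Option String × Int × Int) : Prop :=
  s.1 = PySem.Dict.counter pre ∧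
  (∀ x : String, s.2.1.get? x = if x ∈ pre then some ((pre.idxOf x : Int)) else none) ∧
  (pre = [] → s.2.2 = (none, 0, 10 ^ 18)) ∧
  (pre ≠ [] → ∃ w, s.2.2.1 = some w ∧ pvIsMode pre w ∧
      s.2.2.2 = ((pre.count w : Int), (pre.idxOf w : Int)))

theorem pvIdxOf_append_mem {pre : List String} {x : String} (h : x ∈ pre) (k : String) :
    (pre ++ [k]).idxOf x = pre.idxOf x := by
  rw [List.idxOf_append, if_pos h]

theorem pvCount_append_ne {pre : List String} {x k : String} (h : x ≠ k) :
    (pre ++ [k]).count x = pre.count x := by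
  simp [List.count_append, h.symm]

theorem pvCount_append_self (pre : List String) (k : String) :
    (pre ++ [k]).count k = pre.count k + 1 := by
  simp [List.count_append]

theorem pvMode_append_keep {pre : List String} {k w : String} (hw : pvIsMode pre w) (hkw : k ≠ w)
    (hle : pre.count k + 1 ≤ pre.count w)
    (htie : pre.count k + 1 = pre.count w → pre.idxOf w ≤ (pre ++ [k]).idxOf k) :
    pvIsMode (pre ++ [k]) w := by
  obtain ⟨hm, hc, hi⟩ := hw
  have hcw : (pre ++ [k]).count w = pre.count w := pvCount_append_ne (fun e => hkw e.symm)
  have hiw : (pre ++ [k]).idxOf w = pre.idxOf w := pvIdxOf_append_mem hm k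
  refine ⟨List.mem_append_left _ hm, ?_, ?_⟩
  · intro x hx
    by_cases hxk : x = k
    · subst hxk
      rw [pvCount_append_self, hcw]
      exact hle
    · have hxp : x ∈ pre := by
        rcases List.mem_append.mp hx with h1 | h1
        · exact h1
        · exact absurd (by simpa using h1) hxk
      rw [pvCount_append_ne hxk, hcw]
      exact hc x hxp
  · intro x hx hcx
    by_cases hxk : x = k
    · subst hxk
      rw [pvCount_append_self, hcw] at hcx
      rw [hiw]
      exact htie hcx
    · have hxp : x ∈ pre := by
        rcases List.mem_append.mp hx with h1 | h1
        · exact h1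
        · exact absurd (by simpa using h1) hxk
      rw [pvCount_append_ne hxk, hcw] at hcx
      rw [hiw, pvIdxOf_append_mem hxp]
      exact hi x hxp hcx

theorem pvMode_append_take {pre : List String} {k w : String} (hw : pvIsMode pre w)
    (hge : pre.count w ≤ pre.count k + 1)
    (htie : pre.count k + 1 = pre.count w → (pre ++ [k]).idxOf k ≤ pre.idxOf w) :
    pvIsMode (pre ++ [k]) k := by
  obtain ⟨hm, hc, hi⟩ := hw
  refine ⟨List.mem_append_right _ (by simp), ?_, ?_⟩
  · intro x hx
    by_cases hxk : x = k
    · subst hxk; exact le_refl _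
    · have hxp : x ∈ pre := by
        rcases List.mem_append.mp hx with h1 | h1
        · exact h1
        · exact absurd (by simpa using h1) hxk
      rw [pvCount_append_ne hxk, pvCount_append_self]
      exact le_trans (le_trans (hc x hxp) hge) (le_refl _)
  · intro x hx hcx
    by_cases hxk : x = k
    · subst hxk; exact le_refl _
    · have hxp : x ∈ pre := by
        rcases List.mem_append.mp hx with h1 | h1
        · exact h1
        · exact absurd (by simpa using h1) hxk
      rw [pvCount_append_ne hxk, pvCount_append_self] at hcx
      have hxle : pre.count x ≤ pre.count w := hc x hxp
      have heq : pre.count k + 1 = pre.count w := by omega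
      have hxw : pre.count x = pre.count w := by omega
      rw [pvIdxOf_append_mem hxp]
      exact le_trans (htie heq) (hi x hxp hxw)

theorem pvStep_inv {pre : List String}
    {s : PySem.Dict String Int × PySem.Dict String Int × Option String × Int × Int}
    (h : pvInv pre s) (k : String) :
    pvInv (pre ++ [k]) (pvStepA s ((pre.length : Int), k)) := by
  obtain ⟨counts, fidx, bk, best⟩ := s
  obtain ⟨hc, hf, hemp, hne⟩ := h
  simp only at hc hf hemp hne
  -- the new counts dict
  have hc' : counts.modify k 0 (· + 1) = PySem.Dict.counter (pre ++ [k]) := by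
    rw [hc, PySem.Dict.counter_append_singleton]
  -- the new first-index dict
  have hcont : fidx.contains k = decide (k ∈ pre) := by
    rw [PySem.Dict.contains_eq_isSome_get?, hf k]
    by_cases hk : k ∈ pre <;> simp [hk]
  have hf' : ∀ x : String,
      (if fidx.contains k then fidx else fidx.insert k (pre.length : Int)).get? x =
        if x ∈ pre ++ [k] then some (((pre ++ [k]).idxOf x : Int)) else none := by
    intro x
    by_cases hk : k ∈ pre
    · rw [hcont, if_pos (by simpa using hk), hf x]
      by_cases hx : x ∈ pre
      · rw [if_pos hx, if_pos (List.mem_append_left _ hx), pvIdxOf_append_mem hx]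
      · rw [if_neg hx, if_neg]
        intro hmem
        rcases List.mem_append.mp hmem with h1 | h1
        · exact hx h1
        · exact hx (((by simpa using h1 : x = k)) ▸ hk)
    · rw [hcont, if_neg (by simpa using hk)]
      by_cases hxk : x = k
      · subst hxk
        rw [PySem.Dict.get?_insert_self, if_pos (List.mem_append_right _ (by simp))]
        rw [List.idxOf_append, if_neg hk, List.idxOf_cons_self]
        simp
      · rw [PySem.Dict.get?_insert_of_ne fidx _ hxk, hf x]
        by_cases hx : x ∈ pre
        · rw [if_pos hx, if_pos (List.mem_append_left _ hx), pvIdxOf_append_mem hx]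
        · rw [if_neg hx, if_neg]
          intro hmem
          rcases List.mem_append.mp hmem with h1 | h1
          · exact hx h1
          · exact hxk (by simpa using h1)
      -- (x = k and k ∈ pre is covered by the x ∈ pre branch)
  have hcur1 : (counts.modify k 0 (· + 1)).getD k 0 = (((pre ++ [k]).count k : Int)) := by
    rw [hc', PySem.Dict.getD_counter]
  have hcur2 : (if fidx.contains k then fidx else fidx.insert k (pre.length : Int)).getD k 0 =
      (((pre ++ [k]).idxOf k : Int)) := by
    rw [PySem.Dict.getD_eq_get?_getD, hf' k, if_pos (List.mem_append_right _ (by simp))]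
    rfl
  -- unfold one step
  simp only [pvStepA, hcur1, hcur2]
  rcases List.eq_nil_or_concat' pre with hpre | ⟨l0, a0, hpre2⟩
  case _ =>
    -- pre = []: the very first iteration always takes the branch
    subst hpre
    have he := hemp rfl
    have hbk0 : bk = none := congrArg Prod.fst he
    have hbest0 : best = (0, 10 ^ 18) := congrArg Prod.snd he
    subst hbk0; subst hbest0
    rw [if_pos]
    · refine ⟨hc', hf', fun hh => absurd hh (by exact List.cons_ne_nil k []),
        fun _ => ⟨k, rfl, ?_, rfl⟩⟩
      refine ⟨List.mem_singleton.mpr rfl, ?_, ?_⟩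
      · intro x hx
        have hxk : x = k := List.mem_singleton.mp hx
        subst hxk; exact le_refl _
      · intro x hx _
        have hxk : x = k := List.mem_singleton.mp hx
        subst hxk; exact le_refl _
    · left
      show ((((([] : List String) ++ [k]).count k : Nat)) : Int) > ((0 : Int), (10 ^ 18 : Int)).1
      rw [pvCount_append_self]
      push_cast
      omega
  case _ =>
    have hprene : pre ≠ [] := by rw [hpre2]; exact (List.append_ne_nil_of_right_ne_nil _ (List.cons_ne_nil a0 []))
    obtain ⟨w, hbk, hPw, hbest⟩ := hne hprene
    subst hbk hbest
    have hprene' : pre ++ [k] ≠ [] := by simp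
    have hck : (pre ++ [k]).count k = pre.count k + 1 := pvCount_append_self pre k
    rcases Nat.lt_trichotomy (pre.count k + 1) (pre.count w) with hlt | heq | hgt
    · -- count still below the best: branch not taken, keep w
      rw [if_neg]
      · refine ⟨hc', hf', fun hh => absurd hh hprene', fun _ => ⟨w, rfl, ?_, ?_⟩⟩
        · exact pvMode_append_keep hPw
            (by rintro rfl; omega) (le_of_lt hlt) (by omega)
        · have hkw : k ≠ w := by rintro rfl; omega
          rw [pvCount_append_ne (fun e => hkw e.symm), pvIdxOf_append_mem hPw.1]
      · rw [hck]
        push_cast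
        omega
    · -- tie on the count: first index decides
      have hkw : k ≠ w := by rintro rfl; omega
      by_cases hidx : (pre ++ [k]).idxOf k < pre.idxOf w
      · rw [if_pos]
        · exact ⟨hc', hf', fun hh => absurd hh hprene', fun _ => ⟨k, rfl,
            pvMode_append_take hPw (by omega) (fun _ => le_of_lt hidx), by rw [hck]⟩⟩
        · right
          constructor
          · rw [hck]; push_cast; omega
          · have hcast : ((List.idxOf k (pre ++ [k]) : Nat) : Int)
                < ((List.idxOf w pre : Nat) : Int) := by exact_mod_cast hidx
            simpa using hcast
      · rw [if_neg]
        · refine ⟨hc', hf', fun hh => absurd hh hprene', fun _ => ⟨w, rfl, ?_, ?_⟩⟩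
          · exact pvMode_append_keep hPw hkw (by omega) (fun _ => by omega)
          · rw [pvCount_append_ne (fun e => hkw e.symm), pvIdxOf_append_mem hPw.1]
        · rw [hck]
          push_cast
          rintro (h1 | ⟨h1, h2⟩)
          · omega
          · exact hidx (by exact_mod_cast h2)
    · -- k pulls ahead: branch taken, k is the new best
      rw [if_pos]
      · exact ⟨hc', hf', fun hh => absurd hh hprene', fun _ => ⟨k, rfl,
          pvMode_append_take hPw (by omega) (by omega), by rw [hck]⟩⟩
      · left
        rw [hck]
        push_cast
        omega

theorem pvLoop (suf : List String) :
    ∀ (pre : List String)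
      (s : PySem.Dict String Int × PySem.Dict String Int × Option String × Int × Int),
      pvInv pre s →
      pvInv (pre ++ suf) ((PySem.List.enumerate suf (pre.length : Int)).foldl pvStepA s) := by
  induction suf with
  | nil => intro pre s h; simpa [PySem.List.enumerate] using h
  | cons k suf ih =>
    intro pre s h
    rw [PySem.List.enumerate_cons, List.foldl_cons]
    have h1 := pvStep_inv h k
    have h2 := ih (pre ++ [k]) _ h1
    have hlen : ((pre ++ [k]).length : Int) = (pre.length : Int) + 1 := by
      simp
    rw [hlen] at h2
    simpa using h2

theorem pvA_char {keys : List String} (hne : keys ≠ []) :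
    ∃ w, mode_key_py keys = some w ∧ pvIsMode keys w := by
  have hinit : pvInv []
      ((PySem.Dict.empty, PySem.Dict.empty, none, 0, 10 ^ 18) :
        PySem.Dict String Int × PySem.Dict String Int × Option String × Int × Int) := by
    refine ⟨?_, ?_, fun _ => rfl, fun hh => absurd rfl hh⟩
    · rw [PySem.Dict.counter_eq_foldl]; rfl
    · intro x; simp [PySem.Dict.get?_empty]
  have := pvLoop keys [] _ hinit
  simp only [List.nil_append, List.length_nil, Nat.cast_zero] at this
  obtain ⟨_, _, _, hw⟩ := this
  obtain ⟨w, hbk, hPw, _⟩ := hw hne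
  refine ⟨w, ?_, hPw⟩
  unfold mode_key_py
  rw [if_neg hne]
  exact hbk

-- ===== VERDICT (by name: the statement is the Claim_ definition above) =====
theorem mode_key_py_spec : Claim_equal_mode_key_py := by
  intro keys _
  unfold Spec_mode_key_py
  by_cases hne : keys = []
  · subst hne; rfl
  · obtain ⟨w, hA, hPA⟩ := pvA_char hne
    obtain ⟨w', hB, hPB⟩ := pvB_char hne
    rw [hA, hB, pvIsMode_unique hPA hPB]
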